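-- pv_equiv track=rewrite | github.com/simnple/boj | 3000/3492.py | lmsr
-- ===== SOURCE A (Python) =====
-- def lmsr(s):
--     l = len(s)
--     s += s
--
--     i = j = k = 0
--     j = 1
--
--     while i < l and j < l and k < l:
--         if s[i+k] > s[j+k]:
--             i += k + 1
--             j = i + 1
--             k = 0
--         elif s[i+k] < s[j+k]:
--             j += k + 1
--             k = 0
--         else:
--             k += 1
--     return i + 1
-- ===== SOURCE B (Python) =====
-- def lmsr(s):
--     l = len(s)
--     t = s + s
--     best = 0
--     for i in range(1, l):
--         for k in range(l):
--             a = t[best + k]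
--             b = t[i + k]
--             if a != b:
--                 if b < a:
--                     best = i
--                 break
--     return best + 1
-- ===== Notes on version B (the rewrite author's own statement) =====
-- stated objective: simpler
-- what changed: Replaces the three-pointer i/j/k least-rotation scan with a plain brute-force argmin: each candidate start is compared character-by-character against the current best on the doubled string, updating only on strict '<' so the first minimal index wins.
import Mathlib
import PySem

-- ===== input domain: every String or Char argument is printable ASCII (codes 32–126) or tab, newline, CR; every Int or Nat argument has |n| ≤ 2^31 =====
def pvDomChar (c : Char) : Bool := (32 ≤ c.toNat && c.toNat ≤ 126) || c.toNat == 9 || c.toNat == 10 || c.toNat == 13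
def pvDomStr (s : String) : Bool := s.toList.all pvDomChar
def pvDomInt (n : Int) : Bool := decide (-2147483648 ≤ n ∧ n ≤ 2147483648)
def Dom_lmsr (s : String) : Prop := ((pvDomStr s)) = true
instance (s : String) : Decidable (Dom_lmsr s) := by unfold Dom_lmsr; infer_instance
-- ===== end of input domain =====

-- B replaces A's three-pointer Duval/Booth least-rotation scan with a brute-force
-- argmin over all rotation start indices (objective: simpler).

-- ===== PORT A =====
-- A's while loop over state (i, j, k); under the guard i+k, j+k < 2*l, so getD is
-- exact for Python's s[i+k] / s[j+k] on the doubled string.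
def lmsrLoop (t : List Char) (l i j k : Nat) : Nat :=
  if h : i < l ∧ j < l ∧ k < l then
    if t.getD (i + k) default > t.getD (j + k) default then
      lmsrLoop t l (i + k + 1) (i + k + 2) 0
    else if t.getD (i + k) default < t.getD (j + k) default then
      lmsrLoop t l i (j + k + 1) 0
    else
      lmsrLoop t l i j (k + 1)
  else i
termination_by (l + l - i, l + l - j, l - k)
decreasing_by
  · exact Prod.Lex.left _ _
      (Nat.sub_lt_sub_left (Nat.lt_of_lt_of_le h.1 (Nat.le_add_left l l))
        (Nat.lt_add_of_pos_right (Nat.succ_pos k)))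
  · exact Prod.Lex.right _ (Prod.Lex.left _ _
      (Nat.sub_lt_sub_left (Nat.lt_of_lt_of_le h.2.1 (Nat.le_add_left l l))
        (Nat.lt_add_of_pos_right (Nat.succ_pos k))))
  · exact Prod.Lex.right _ (Prod.Lex.right _ (Nat.sub_succ_lt_self l k h.2.2))

def lmsr (s : String) : Int :=
  let cs := s.toList
  let l := cs.length
  let t := cs ++ cs
  (lmsrLoop t l 0 1 0 : Int) + 1

-- ===== PORT B =====
-- B's inner `for k in range(l)` with its break: the first mismatching character
-- decides whether candidate i replaces the current best.
def scanK (t : List Char) (l best i k : Nat) : Nat :=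
  if k < l then
    if t.getD (best + k) default ≠ t.getD (i + k) default then
      (if t.getD (i + k) default < t.getD (best + k) default then i else best)
    else scanK t l best i (k + 1)
  else best
termination_by l - k
decreasing_by exact Nat.sub_succ_lt_self l k (by assumption)

def lmsr_alt (s : String) : Int :=
  let cs := s.toList
  let l := cs.length
  let t := cs ++ cs
  let best := (List.range' 1 (l - 1)).foldl (fun best i => scanK t l best i 0) 0
  (best : Int) + 1

-- ===== PRECONDITION & SPEC =====
def Spec_lmsr (s : String) (out : Int) : Prop := out = lmsr_alt s
instance (s : String) (out : Int) : Decidable (Spec_lmsr s out) := by unfold Spec_lmsr; infer_instance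

-- ===== CLAIM (what is proved, stated in full; the proofs are below) =====
def Claim_equal_lmsr : Prop := ∀ (s : String), Dom_lmsr s → Spec_lmsr s (lmsr s)

-- ===== LEMMAS AND PROOFS =====

-- character of the circular string at position m
def rchr (cs : List Char) (m : Nat) : Char := cs.getD (m % cs.length) default

-- the rotation starting at a is lexicographically strictly below the one starting at b
def rotLt (cs : List Char) (a b : Nat) : Prop :=
  ∃ k, k < cs.length ∧ (∀ x, x < k → rchr cs (a + x) = rchr cs (b + x)) ∧
    rchr cs (a + k) < rchr cs (b + k)

def rotEq (cs : List Char) (a b : Nat) : Prop :=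
  ∀ x, x < cs.length → rchr cs (a + x) = rchr cs (b + x)

-- m is not the least index of a lexicographically minimal rotation
def Bad (cs : List Char) (m : Nat) : Prop :=
  ∃ m', m' < cs.length ∧ (rotLt cs m' m ∨ (m' < m ∧ rotEq cs m' m))

lemma getD_doubled (cs : List Char) (x : Nat) (hx : x < 2 * cs.length) :
    (cs ++ cs).getD x default = rchr cs x := by
  unfold rchr
  rcases Nat.lt_or_ge x cs.length with h | h
  · rw [List.getD_eq_getElem?_getD, List.getElem?_append_left h, Nat.mod_eq_of_lt h,
      List.getD_eq_getElem?_getD]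
  · rw [List.getD_eq_getElem?_getD, List.getElem?_append_right h,
      Nat.mod_eq_sub_mod h, Nat.mod_eq_of_lt (by omega), List.getD_eq_getElem?_getD]

lemma rchr_congr (cs : List Char) {a b : Nat} (h : a % cs.length = b % cs.length) :
    rchr cs a = rchr cs b := by
  unfold rchr; rw [h]

lemma rchr_mod_add (cs : List Char) (a x : Nat) :
    rchr cs (a % cs.length + x) = rchr cs (a + x) := by
  apply rchr_congr
  rw [Nat.add_mod, Nat.mod_mod_of_dvd _ dvd_rfl, ← Nat.add_mod]

lemma rchr_add_mod (cs : List Char) (a x : Nat) :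
    rchr cs (a + x % cs.length) = rchr cs (a + x) := by
  apply rchr_congr
  rw [Nat.add_mod, Nat.mod_mod_of_dvd _ dvd_rfl, ← Nat.add_mod]

lemma rotLt_mod_left (cs : List Char) (a b : Nat) (h : rotLt cs a b) :
    rotLt cs (a % cs.length) b := by
  obtain ⟨k, hk, hpre, hlt⟩ := h
  exact ⟨k, hk, fun x hx => by rw [rchr_mod_add]; exact hpre x hx,
    by rw [rchr_mod_add]; exact hlt⟩

lemma rotLt_irrefl (cs : List Char) (a : Nat) : ¬ rotLt cs a a := by
  rintro ⟨k, _, _, hlt⟩; exact lt_irrefl _ hlt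

lemma rotLt_trans (cs : List Char) {a b c : Nat}
    (h1 : rotLt cs a b) (h2 : rotLt cs b c) : rotLt cs a c := by
  obtain ⟨k1, hk1, p1, l1⟩ := h1
  obtain ⟨k2, hk2, p2, l2⟩ := h2
  refine ⟨min k1 k2, by omega, fun x hx => ?_, ?_⟩
  · rw [p1 x (by omega), p2 x (by omega)]
  · rcases Nat.lt_trichotomy k1 k2 with h | h | h
    · rw [Nat.min_eq_left (by omega), ← p2 k1 h]; exact l1
    · subst h; rw [Nat.min_self]; exact lt_trans l1 l2
    · rw [Nat.min_eq_right (by omega), p1 k2 h]; exact l2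

lemma rotLt_of_eq_lt (cs : List Char) {a b c : Nat}
    (he : rotEq cs a b) (h : rotLt cs b c) : rotLt cs a c := by
  obtain ⟨k, hk, hp, hl⟩ := h
  exact ⟨k, hk, fun x hx => by rw [he x (by omega)]; exact hp x hx,
    by rw [he k hk]; exact hl⟩

-- ===== A-side: the loop eliminates every index other than its result =====
lemma loopInv (cs : List Char) :
    ∀ i j k, i < j →
      (∀ x, x < k → rchr cs (i + x) = rchr cs (j + x)) →
      (∀ m, m < j → m ≠ i → Bad cs m) →
      ∀ m, m < cs.length → m ≠ lmsrLoop (cs ++ cs) cs.length i j k → Bad cs m := by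
  intro i j k
  induction i, j, k using lmsrLoop.induct (t := cs ++ cs) (l := cs.length) with
  | case1 i j k h hgt ih =>
    intro hij H2 H3
    rw [lmsrLoop, dif_pos h, if_pos hgt]
    have hgt' : rchr cs (j + k) < rchr cs (i + k) := by
      rw [← getD_doubled cs (j + k) (by omega), ← getD_doubled cs (i + k) (by omega)]
      exact hgt
    refine ih (by omega) (by intro x hx; omega) ?_
    intro m hm hne
    rcases Nat.lt_or_ge m i with hmi | hmi
    · exact H3 m (by omega) (by omega)
    · have hl0 : 0 < cs.length := by omega
      refine ⟨(j + (m - i)) % cs.length, Nat.mod_lt _ hl0, Or.inl ?_⟩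
      apply rotLt_mod_left
      refine ⟨k - (m - i), by omega, ?_, ?_⟩
      · intro y hy
        have e1 : j + (m - i) + y = j + (m - i + y) := by omega
        have e2 : m + y = i + (m - i + y) := by omega
        rw [e1, e2]
        exact (H2 (m - i + y) (by omega)).symm
      · have e1 : j + (m - i) + (k - (m - i)) = j + k := by omega
        have e2 : m + (k - (m - i)) = i + k := by omega
        rw [e1, e2]; exact hgt'
  | case2 i j k h hngt hlt ih =>
    intro hij H2 H3
    rw [lmsrLoop, dif_pos h, if_neg hngt, if_pos hlt]
    have hlt' : rchr cs (i + k) < rchr cs (j + k) := by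
      rw [← getD_doubled cs (j + k) (by omega), ← getD_doubled cs (i + k) (by omega)]
      exact hlt
    refine ih (by omega) (by intro x hx; omega) ?_
    intro m hm hne
    rcases Nat.lt_or_ge m j with hmj | hmj
    · exact H3 m hmj hne
    · have hl0 : 0 < cs.length := by omega
      refine ⟨(i + (m - j)) % cs.length, Nat.mod_lt _ hl0, Or.inl ?_⟩
      apply rotLt_mod_left
      refine ⟨k - (m - j), by omega, ?_, ?_⟩
      · intro y hy
        have e1 : i + (m - j) + y = i + (m - j + y) := by omega
        have e2 : m + y = j + (m - j + y) := by omega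
        rw [e1, e2]
        exact H2 (m - j + y) (by omega)
      · have e1 : i + (m - j) + (k - (m - j)) = i + k := by omega
        have e2 : m + (k - (m - j)) = j + k := by omega
        rw [e1, e2]; exact hlt'
  | case3 i j k h hngt hnlt ih =>
    intro hij H2 H3
    rw [lmsrLoop, dif_pos h, if_neg hngt, if_neg hnlt]
    have heq : rchr cs (i + k) = rchr cs (j + k) := by
      rw [← getD_doubled cs (j + k) (by omega), ← getD_doubled cs (i + k) (by omega)]
      exact le_antisymm (not_lt.mp hngt) (not_lt.mp hnlt)
    refine ih hij ?_ H3
    intro x hx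
    rcases Nat.lt_or_ge x k with h2 | h2
    · exact H2 x h2
    · have : x = k := by omega
      subst this; exact heq
  | case4 i j k h =>
    intro hij H2 H3
    rw [lmsrLoop, dif_neg h]
    intro m hm hne
    have hl0 : 0 < cs.length := by omega
    rcases Nat.lt_or_ge m j with hmj | hmj
    · exact H3 m hmj hne
    · -- here j < cs.length hence i < cs.length, so the guard failed with k ≥ cs.length:
      -- the circular string has period j - i, which eliminates every m ≥ j
      have hk : cs.length ≤ k := by omega
      have hper : ∀ y, rchr cs (i + y) = rchr cs (j + y) := by
        intro y
        have h1 : rchr cs (i + y) = rchr cs (i + y % cs.length) := (rchr_add_mod cs i y).symm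
        have h2 : rchr cs (j + y % cs.length) = rchr cs (j + y) := rchr_add_mod cs j y
        rw [h1, ← h2]
        exact H2 (y % cs.length) (by have := Nat.mod_lt y hl0; omega)
      refine ⟨m - (j - i), by omega, Or.inr ⟨by omega, ?_⟩⟩
      intro x hx
      have e1 : m - (j - i) + x = i + (m - j + x) := by omega
      have e2 : m + x = j + (m - j + x) := by omega
      rw [e1, e2]
      exact hper (m - j + x)

-- ===== B-side: the scan decides `rotLt i best`, the fold keeps the least minimizer =====
lemma scan_lemma (cs : List Char) (b i : Nat) (hb : b < cs.length) (hi : i < cs.length) :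
    ∀ n k, n = cs.length - k →
      (∀ x, x < k → rchr cs (b + x) = rchr cs (i + x)) →
      ((rotLt cs i b → scanK (cs ++ cs) cs.length b i k = i) ∧
       (¬ rotLt cs i b → scanK (cs ++ cs) cs.length b i k = b)) := by
  intro n
  induction n with
  | zero =>
    intro k hn hpre
    have hk : ¬ k < cs.length := by omega
    rw [scanK, if_neg hk]
    constructor
    · rintro ⟨k', hk', _, hl⟩
      rw [hpre k' (by omega)] at hl
      exact absurd hl (lt_irrefl _)
    · intro _; rfl
  | succ n ih =>
    intro k hn hpre
    have hk : k < cs.length := by omega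
    rw [scanK, if_pos hk, getD_doubled cs (b + k) (by omega), getD_doubled cs (i + k) (by omega)]
    by_cases hne : rchr cs (b + k) ≠ rchr cs (i + k)
    · rw [if_pos hne]
      rcases lt_trichotomy (rchr cs (i + k)) (rchr cs (b + k)) with hlt | heq | hgt
      · rw [if_pos hlt]
        refine ⟨fun _ => rfl, fun hn2 => absurd ⟨k, hk, fun x hx => (hpre x hx).symm, hlt⟩ hn2⟩
      · exact absurd heq.symm hne
      · rw [if_neg (not_lt.mpr (le_of_lt hgt))]
        have hnot : ¬ rotLt cs i b := by
          rintro ⟨k', hk', hp, hl⟩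
          rcases Nat.lt_trichotomy k' k with h | h | h
          · rw [← hpre k' h] at hl
            exact absurd hl (lt_irrefl _)
          · subst h; exact absurd hl (not_lt.mpr (le_of_lt hgt))
          · exact hne (hp k h).symm
        exact ⟨fun h => absurd h hnot, fun _ => rfl⟩
    · rw [if_neg hne]
      have hne' : rchr cs (b + k) = rchr cs (i + k) := not_not.mp hne
      refine ih (k + 1) (by omega) ?_
      intro x hx
      rcases Nat.lt_or_ge x k with h2 | h2
      · exact hpre x h2
      · have : x = k := by omega
        subst this; exact hne'

def GoodUpto (cs : List Char) (n b : Nat) : Prop :=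
  b < n ∧ (∀ m, m < n → ¬ rotLt cs m b) ∧ (∀ m, m < b → ¬ rotEq cs m b)

lemma fold_inv (cs : List Char) :
    ∀ c s b, s + c ≤ cs.length → GoodUpto cs s b →
      GoodUpto cs (s + c)
        ((List.range' s c).foldl (fun best i => scanK (cs ++ cs) cs.length best i 0) b) := by
  intro c
  induction c with
  | zero => intro s b _ hg; simpa using hg
  | succ c ih =>
    intro s b hsc hg
    simp only [List.range'_succ, List.foldl_cons]
    have hb : b < cs.length := by have := hg.1; omega
    have hs : s < cs.length := by omega
    have hstep := scan_lemma cs b s hb hs (cs.length - 0) 0 rfl (by intro x hx; omega)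
    by_cases h : rotLt cs s b
    · rw [hstep.1 h]
      have hg' : GoodUpto cs (s + 1) s := by
        refine ⟨Nat.lt_succ_self _, ?_, ?_⟩
        · intro m hm
          rcases Nat.lt_or_ge m s with h2 | h2
          · intro hml; exact hg.2.1 m (by omega) (rotLt_trans cs hml h)
          · have : m = s := by omega
            subst this; exact rotLt_irrefl cs m
        · intro m hm hme; exact hg.2.1 m (by omega) (rotLt_of_eq_lt cs hme h)
      have hres := ih (s + 1) s (by omega) hg'
      have e : s + (c + 1) = s + 1 + c := by omega
      rw [e]; exact hres
    · rw [hstep.2 h]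
      have hg' : GoodUpto cs (s + 1) b := by
        refine ⟨by have := hg.1; omega, ?_, hg.2.2⟩
        intro m hm
        rcases Nat.lt_or_ge m s with h2 | h2
        · exact hg.2.1 m h2
        · have : m = s := by omega
          subst this; exact h
      have hres := ih (s + 1) b (by omega) hg'
      have e : s + (c + 1) = s + 1 + c := by omega
      rw [e]; exact hres

-- the two algorithms agree on the list level
lemma main_eq (cs : List Char) :
    lmsrLoop (cs ++ cs) cs.length 0 1 0 =
      (List.range' 1 (cs.length - 1)).foldl (fun best i => scanK (cs ++ cs) cs.length best i 0) 0 := by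
  by_cases h0 : cs.length = 0
  · rw [lmsrLoop, dif_neg (by omega)]
    have e : cs.length - 1 = 0 := by omega
    rw [e]
    simp [List.range']
  · have hl0 : 0 < cs.length := Nat.pos_of_ne_zero h0
    have hA := loopInv cs 0 1 0 (by omega) (by intro x hx; omega) (by intro m hm hne; omega)
    have hG1 : GoodUpto cs 1 0 := by
      refine ⟨by omega, ?_, ?_⟩
      · intro m hm hr
        have hm0 : m = 0 := by omega
        subst hm0
        exact rotLt_irrefl cs 0 hr
      · intro m hm; omega
    have hB := fold_inv cs (cs.length - 1) 1 0 (by omega) hG1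
    have e : 1 + (cs.length - 1) = cs.length := by omega
    rw [e] at hB
    by_contra hne
    obtain ⟨m', hm', hcase⟩ := hA _ hB.1 (fun hh => hne hh.symm)
    rcases hcase with h | ⟨hlt, heq⟩
    · exact hB.2.1 m' hm' h
    · exact hB.2.2 m' hlt heq

-- ===== VERDICT (by name: the statement is the Claim_ definition above) =====
theorem lmsr_spec : Claim_equal_lmsr := by
  intro s _
  unfold Spec_lmsr lmsr lmsr_alt
  simp only []
  rw [main_eq s.toList]
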